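-- pv_equiv track=rewrite | github.com/nimch681/ECGdataAnalysis | codes/python/heartbeat_segmentation.py | check_class_AAMI
-- ===== SOURCE A (Python) =====
-- def check_class_AAMI(classAnttd, class_AAMI):
--     AAMI_classes = []
--     AAMI_classes.append(['N', 'L', 'R'])                    # N
--     AAMI_classes.append(['A', 'a', 'J', 'S', 'e', 'j'])     # SVEB
--     AAMI_classes.append(['V', 'E'])                         # VEB
--     AAMI_classes.append(['F'])
--     for i in range(0,len(AAMI_classes)):
--
--         if classAnttd in AAMI_classes[i]:
--             class_AAMI = i
--
--     return class_AAMI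
-- ===== SOURCE B (Python) =====
-- def check_class_AAMI(classAnttd, class_AAMI):
--     # Single flat scan over a delimiter-separated symbol string: '/' advances the
--     # group counter, a matching symbol returns the current group index immediately.
--     group = 0
--     for ch in "NLR/AaJSej/VE/F":
--         if ch == '/':
--             group += 1
--         elif ch == classAnttd:
--             return group
--     return class_AAMI
-- ===== Notes on version B (the rewrite author's own statement) =====
-- stated objective: alternative
-- what changed: Replaced the loop over four lists with per-list membership tests by a single left-to-right scan of one flat delimiter-separated symbol string, counting '/' delimiters to know the group index and returning it early at the first matching character.
import Mathlib
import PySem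

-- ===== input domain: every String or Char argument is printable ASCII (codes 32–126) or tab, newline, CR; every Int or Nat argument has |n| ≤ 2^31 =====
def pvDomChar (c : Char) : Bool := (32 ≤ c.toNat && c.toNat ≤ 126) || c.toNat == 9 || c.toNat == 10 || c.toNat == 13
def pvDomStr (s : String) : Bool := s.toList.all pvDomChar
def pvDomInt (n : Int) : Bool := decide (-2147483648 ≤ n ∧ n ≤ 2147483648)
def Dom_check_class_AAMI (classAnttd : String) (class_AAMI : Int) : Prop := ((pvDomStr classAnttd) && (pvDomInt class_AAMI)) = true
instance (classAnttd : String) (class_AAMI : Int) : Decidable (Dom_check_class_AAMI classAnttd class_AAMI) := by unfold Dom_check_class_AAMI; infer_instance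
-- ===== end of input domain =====

-- B replaces A's loop over four membership-tested lists by one left-to-right scan of a
-- flat '/'-separated symbol string, counting delimiters and returning the current group
-- index at the first matching character (alternative decomposition; return value only).

-- ===== PORT A =====
-- the four AAMI class lists, built by append as in A
def pvAAMIclasses : List (List String) :=
  [["N", "L", "R"], ["A", "a", "J", "S", "e", "j"], ["V", "E"], ["F"]]

def check_class_AAMI (classAnttd : String) (class_AAMI : Int) : Int :=
  (PySem.List.pyRange 0 (pvAAMIclasses.length : Int) 1).foldl
    (fun acc i =>
      match PySem.List.pyGet? pvAAMIclasses i with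
      | some l => if l.contains classAnttd then i else acc
      | none => acc)
    class_AAMI

-- ===== PORT B =====
-- Source B's for-loop with early return: '/' increments the group counter, a character
-- equal to the whole argument string returns the counter (Python's ch == classAnttd
-- compares the one-char string ch with classAnttd; ported as String.singleton c = sym).
def pvScanGroups : List Char → Int → String → Int → Int
  | [], _, _, default => default
  | c :: rest, group, sym, default =>
      if c = '/' then pvScanGroups rest (group + 1) sym default
      else if String.singleton c = sym then group
      else pvScanGroups rest group sym default

def check_class_AAMI_alt (classAnttd : String) (class_AAMI : Int) : Int :=
  pvScanGroups "NLR/AaJSej/VE/F".toList 0 classAnttd class_AAMI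

-- ===== PRECONDITION & SPEC =====
def Spec_check_class_AAMI (classAnttd : String) (class_AAMI : Int) (out : Int) : Prop := out = check_class_AAMI_alt classAnttd class_AAMI
instance (classAnttd : String) (class_AAMI : Int) (out : Int) : Decidable (Spec_check_class_AAMI classAnttd class_AAMI out) := by unfold Spec_check_class_AAMI; infer_instance

-- ===== CLAIM (what is proved, stated in full; the proofs are below) =====
def Claim_equal_check_class_AAMI : Prop := ∀ (classAnttd : String) (class_AAMI : Int), Dom_check_class_AAMI classAnttd class_AAMI → Spec_check_class_AAMI classAnttd class_AAMI (check_class_AAMI classAnttd class_AAMI)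

-- ===== LEMMAS AND PROOFS =====
-- the one-char strings B compares against, as ordinary literals
theorem pvSgN : String.singleton 'N' = "N" := by decide
theorem pvSgL : String.singleton 'L' = "L" := by decide
theorem pvSgR : String.singleton 'R' = "R" := by decide
theorem pvSgA : String.singleton 'A' = "A" := by decide
theorem pvSga : String.singleton 'a' = "a" := by decide
theorem pvSgJ : String.singleton 'J' = "J" := by decide
theorem pvSgS : String.singleton 'S' = "S" := by decide
theorem pvSge : String.singleton 'e' = "e" := by decide
theorem pvSgj : String.singleton 'j' = "j" := by decide
theorem pvSgV : String.singleton 'V' = "V" := by decide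
theorem pvSgE : String.singleton 'E' = "E" := by decide
theorem pvSgF : String.singleton 'F' = "F" := by decide

-- ===== VERDICT (by name: the statement is the Claim_ definition above) =====
theorem check_class_AAMI_spec : Claim_equal_check_class_AAMI := by
  intro s c _
  show check_class_AAMI s c = check_class_AAMI_alt s c
  by_cases hN : s = "N"; · subst hN; rfl
  by_cases hL : s = "L"; · subst hL; rfl
  by_cases hR : s = "R"; · subst hR; rfl
  by_cases hA : s = "A"; · subst hA; rfl
  by_cases ha : s = "a"; · subst ha; rfl
  by_cases hJ : s = "J"; · subst hJ; rfl
  by_cases hS : s = "S"; · subst hS; rfl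
  by_cases he : s = "e"; · subst he; rfl
  by_cases hj : s = "j"; · subst hj; rfl
  by_cases hV : s = "V"; · subst hV; rfl
  by_cases hE : s = "E"; · subst hE; rfl
  by_cases hF : s = "F"; · subst hF; rfl
  simp [check_class_AAMI, check_class_AAMI_alt, pvScanGroups, pvAAMIclasses,
    PySem.List.pyRange, PySem.List.pyGet?, PySem.List.pyIdx?, List.range_succ,
    pvSgN, pvSgL, pvSgR, pvSgA, pvSga, pvSgJ, pvSgS, pvSge, pvSgj, pvSgV, pvSgE, pvSgF,
    Ne.symm hN, Ne.symm hL, Ne.symm hR, Ne.symm hA, Ne.symm ha, Ne.symm hJ,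
    Ne.symm hS, Ne.symm he, Ne.symm hj, Ne.symm hV, Ne.symm hE, Ne.symm hF,
    hN, hL, hR, hA, ha, hJ, hS, he, hj, hV, hE, hF]
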